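-- pv_equiv track=rewrite | github.com/audwndl/Coding-test | 프로그래머스/2/12973. 짝지어 제거하기/짝지어 제거하기.py | solution
-- ===== SOURCE A (Python) =====
-- def solution(s):
--     a = []
--     for i in s:
--         if not a:
--             a.append(i)
--         elif a[-1] == i:
--             a.pop()
--         else:
--             a.append(i)
--     if not a:
--         return 1
--     else:
--         return 0
-- ===== SOURCE B (Python) =====
-- def solution(s):
--     t = s
--     changed = True
--     while changed:
--         changed = False
--         for i in range(len(t) - 1):
--             if t[i] == t[i + 1]:
--                 t = t[:i] + t[i + 2:]
--                 changed = True
--                 break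
--     return 1 if t == "" else 0
-- ===== Notes on version B (the rewrite author's own statement) =====
-- stated objective: alternative
-- what changed: Replaces A's single-pass stack with a fixpoint loop that repeatedly finds the first adjacent equal pair and deletes it, rescanning until none remains.
import Mathlib
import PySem

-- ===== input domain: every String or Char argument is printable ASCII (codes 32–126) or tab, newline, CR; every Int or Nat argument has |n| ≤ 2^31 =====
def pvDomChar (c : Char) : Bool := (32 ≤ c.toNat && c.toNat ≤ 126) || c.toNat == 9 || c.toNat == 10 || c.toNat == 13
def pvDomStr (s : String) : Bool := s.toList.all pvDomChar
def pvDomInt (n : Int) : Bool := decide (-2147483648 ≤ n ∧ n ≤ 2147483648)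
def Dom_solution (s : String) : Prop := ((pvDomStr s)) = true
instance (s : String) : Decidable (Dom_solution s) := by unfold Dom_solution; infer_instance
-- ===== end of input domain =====

-- B replaces A's single-pass stack with a delete-first-adjacent-pair fixpoint loop; alternative algorithm, not faster.

-- ===== PORT A =====
-- one loop step of A: if stack empty push, elif a[-1] == i pop, else push
-- (a[-1] is exact here: the branch is only taken when a is nonempty, where getLast! = a[-1])
def pyStep (a : List Char) (i : Char) : List Char :=
  if a = [] then a ++ [i]
  else if a.getLast! = i then a.dropLast
  else a ++ [i]

def solution (s : String) : Int :=
  let a := s.toList.foldl pyStep []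
  if a = [] then 1 else 0

-- ===== PORT B =====
-- the inner for-scan of Source B: find the first index i with t[i] = t[i+1] and delete the pair;
-- none = no such pair (the while loop stops)
def findReduce : List Char → Option (List Char)
  | x :: y :: rest => if x = y then some rest else (findReduce (y :: rest)).map (x :: ·)
  | _ => none

theorem findReduce_length {l l' : List Char} (h : findReduce l = some l') :
    l'.length + 2 = l.length := by
  induction l generalizing l' with
  | nil => simp [findReduce] at h
  | cons x t ih =>
    match t with
    | [] => simp [findReduce] at h
    | y :: rest =>
      by_cases hxy : x = y
      · simp [findReduce, hxy] at h; simp [← h]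
      · simp [findReduce, hxy] at h
        obtain ⟨m, hm, rfl⟩ := h
        have := ih hm
        simp at this ⊢; omega

-- the while loop of Source B: keep deleting the first adjacent pair until none remains
def fixReduce (l : List Char) : List Char :=
  match h : findReduce l with
  | some l' => fixReduce l'
  | none => l
termination_by l.length
decreasing_by have := findReduce_length h; omega

def solution_alt (s : String) : Int :=
  if fixReduce s.toList = [] then 1 else 0

-- ===== PRECONDITION & SPEC =====
def Spec_solution (s : String) (out : Int) : Prop := out = solution_alt s
instance (s : String) (out : Int) : Decidable (Spec_solution s out) := by unfold Spec_solution; infer_instance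

-- ===== CLAIM (what is proved, stated in full; the proofs are below) =====
def Claim_equal_solution : Prop := ∀ (s : String), Dom_solution s → Spec_solution s (solution s)

-- ===== LEMMAS AND PROOFS =====

theorem pv_getLast! (b : List Char) (d : Char) : (b ++ [d]).getLast! = d := by
  induction b with
  | nil => rfl
  | cons x t _ => simp [List.getLast!]

theorem pv_getLast? (b : List Char) (d : Char) : (b ++ [d]).getLast? = some d := by
  simp

-- a push step of A (also covers the empty-stack branch)
theorem pyStep_push {a : List Char} {c : Char} (h : a.getLast! ≠ c) :
    pyStep a c = a ++ [c] := by
  by_cases ha : a = []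
  · simp [pyStep, ha]
  · unfold pyStep; rw [if_neg ha, if_neg h]

-- a pop step of A
theorem pyStep_pop (b : List Char) (d : Char) : pyStep (b ++ [d]) d = b := by
  have hne : b ++ [d] ≠ [] := by simp
  simp [pyStep, hne]

-- A's stack never holds two equal adjacent elements
theorem pyStep_chain {a : List Char} (h : a.IsChain (· ≠ ·)) (c : Char) :
    (pyStep a c).IsChain (· ≠ ·) := by
  by_cases ha : a = []
  · subst ha; simp [pyStep]
  · obtain ⟨b, d, hbd⟩ := (List.eq_nil_or_concat a).resolve_left ha
    rw [List.concat_eq_append] at hbd; subst hbd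
    by_cases hd : d = c
    · subst hd
      rw [pyStep_pop]
      exact h.prefix (by simp [List.prefix_append])
    · rw [pyStep_push (by rw [pv_getLast!]; exact hd)]
      exact h.append (List.isChain_singleton c) (by simp; exact hd)

-- feeding a stack without adjacent equal elements the same char twice is a no-op
theorem pyStep_double {a : List Char} (h : a.IsChain (· ≠ ·)) (c : Char) :
    pyStep (pyStep a c) c = a := by
  by_cases ha : a = []
  · subst ha
    have h1 : pyStep [] c = [] ++ [c] := by simp [pyStep]
    rw [h1, pyStep_pop]
  · obtain ⟨b, d, hbd⟩ := (List.eq_nil_or_concat a).resolve_left ha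
    rw [List.concat_eq_append] at hbd; subst hbd
    by_cases hd : d = c
    · subst hd
      rw [pyStep_pop]
      by_cases hb : b = []
      · subst hb; simp [pyStep]
      · obtain ⟨b', e, hbe⟩ := (List.eq_nil_or_concat b).resolve_left hb
        rw [List.concat_eq_append] at hbe; subst hbe
        have hec : e ≠ d := by
          rw [List.isChain_append] at h
          simpa [pv_getLast?] using h.2.2
        rw [pyStep_push (by rw [pv_getLast!]; exact hec)]
    · rw [pyStep_push (a := b ++ [d]) (by rw [pv_getLast!]; exact hd),
        pyStep_pop]

-- deleting the first adjacent equal pair does not change A's stack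
theorem foldl_some {l : List Char} : ∀ {l' a : List Char}, findReduce l = some l' →
    a.IsChain (· ≠ ·) → l.foldl pyStep a = l'.foldl pyStep a := by
  induction l with
  | nil => intro l' a h; simp [findReduce] at h
  | cons x t ih =>
    intro l' a h ha
    match t with
    | [] => simp [findReduce] at h
    | y :: rest =>
      by_cases hxy : x = y
      · simp [findReduce, hxy] at h
        subst hxy h
        simp only [List.foldl]
        rw [pyStep_double ha x]
      · simp [findReduce, hxy] at h
        obtain ⟨m, hm, rfl⟩ := h
        simpa [List.foldl] using ih hm (pyStep_chain ha x)

theorem findReduce_none : ∀ {l : List Char}, findReduce l = none →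
    l.IsChain (· ≠ ·) := by
  intro l
  induction l with
  | nil => intro _; exact List.isChain_nil
  | cons x t ih =>
    intro h
    match t with
    | [] => exact List.isChain_singleton x
    | y :: rest =>
      by_cases hxy : x = y
      · simp [findReduce, hxy] at h
      · simp [findReduce, hxy] at h
        exact List.isChain_cons_cons.mpr ⟨hxy, ih h⟩

-- on a pair-free string A's stack just accumulates the input
theorem foldl_none : ∀ {l a : List Char}, (a ++ l).IsChain (· ≠ ·) →
    l.foldl pyStep a = a ++ l := by
  intro l
  induction l with
  | nil => intro a _; simp
  | cons c t ih =>
    intro a h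
    have hgl : a.getLast! ≠ c ∨ a = [] := by
      by_cases ha : a = []
      · exact Or.inr ha
      · obtain ⟨b, d, hbd⟩ := (List.eq_nil_or_concat a).resolve_left ha
        rw [List.concat_eq_append] at hbd; subst hbd
        rw [List.isChain_append] at h
        exact Or.inl (by rw [pv_getLast!]; simpa [pv_getLast?] using h.2.2)
    have hstep : pyStep a c = a ++ [c] := by
      rcases hgl with hgl | rfl
      · exact pyStep_push hgl
      · simp [pyStep]
    have := ih (a := a ++ [c]) (by simpa using h)
    simp only [List.foldl, hstep, this, List.append_assoc, List.singleton_append]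

-- A's stack equals B's fixpoint
theorem foldl_eq_fixReduce (l : List Char) : l.foldl pyStep [] = fixReduce l := by
  induction l using fixReduce.induct with
  | case1 l l' h ih =>
    rw [fixReduce, h, foldl_some h List.isChain_nil, ih]
  | case2 l hnone =>
    rw [fixReduce, hnone]
    simpa using foldl_none (a := []) (by simpa using findReduce_none hnone)

-- ===== VERDICT (by name: the statement is the Claim_ definition above) =====
theorem solution_spec : Claim_equal_solution := by
  intro s _
  unfold Spec_solution solution solution_alt
  rw [foldl_eq_fixReduce]
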